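-- pv_equiv track=rewrite | github.com/haaland09009/Programmers | practice/(X) 롤케이크 자르기.py | solution
-- ===== SOURCE A (Python) =====
-- from collections import Counter
--
-- def solution(topping):
--     answer = 0
--     tp = Counter(topping)
--     checked = set()
--
--     for i in topping:
--         tp[i] -= 1
--         checked.add(i)
--         if tp[i] == 0:
--             tp.pop(i)
--         if len(checked) == len(tp):
--             answer += 1
--
--     return answer
-- ===== SOURCE B (Python) =====
-- def solution(topping):
--     # suffix pass: right[i] = number of distinct topping types in topping[i:]
--     seen = set()
--     right = [0]
--     for t in reversed(topping):
--         seen.add(t)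
--         right.append(len(seen))
--     right.reverse()
--     # forward pass: count cuts where left distinct count equals right distinct count
--     answer = 0
--     left = set()
--     for t, r in zip(topping, right[1:]):
--         left.add(t)
--         if len(left) == r:
--             answer += 1
--     return answer
-- ===== Notes on version B (the rewrite author's own statement) =====
-- stated objective: alternative
-- what changed: A tracks the right side by decrementing a mutable Counter and popping exhausted keys in one pass; B precomputes a suffix distinct-count array with a backward set pass and then counts matches in a forward pass over a growing left set.
import Mathlib
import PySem

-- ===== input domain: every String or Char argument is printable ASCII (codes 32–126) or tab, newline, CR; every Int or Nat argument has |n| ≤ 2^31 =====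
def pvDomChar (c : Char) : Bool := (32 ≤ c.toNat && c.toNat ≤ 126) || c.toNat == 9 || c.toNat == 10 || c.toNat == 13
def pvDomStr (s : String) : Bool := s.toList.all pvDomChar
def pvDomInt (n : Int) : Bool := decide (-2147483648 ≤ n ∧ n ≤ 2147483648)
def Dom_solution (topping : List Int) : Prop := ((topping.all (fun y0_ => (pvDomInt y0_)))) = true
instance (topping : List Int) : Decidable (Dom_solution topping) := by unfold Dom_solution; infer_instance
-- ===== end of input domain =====

-- B replaces A's single mutable-Counter pass by a suffix-distinct-count array plus a forward
-- pass over a growing left set (objective: alternative decomposition, same asymptotic cost).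

-- ===== PORT A =====
-- A's loop state is (answer, tp, checked); 'tp.pop(i)' is reached only when key i is present
-- (it was just written by 'tp[i] -= 1'), so it never raises and is ported as Dict.erase.
def solution (topping : List Int) : Int :=
  let st := topping.foldl
    (fun (st : Int × PySem.Dict Int Int × PySem.Set Int) i =>
      let tp := st.2.1.modify i 0 (· - 1)                          -- tp[i] -= 1
      let checked := PySem.Set.add st.2.2 i                        -- checked.add(i)
      let tp := if tp.getD i 0 == 0 then tp.erase i else tp        -- if tp[i] == 0: tp.pop(i)
      let answer := if checked.length == tp.size then st.1 + 1 else st.1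
      (answer, tp, checked))
    (0, PySem.Dict.counter topping, PySem.Set.empty)
  st.1

-- ===== PORT B =====
def solution_alt (topping : List Int) : Int :=
  -- suffix pass over reversed(topping): right[i] = distinct count of topping[i:]
  let pr := topping.reverse.foldl
    (fun (p : List Int × PySem.Set Int) t =>
      let s := PySem.Set.add p.2 t
      (p.1 ++ [(s.length : Int)], s))
    (([0] : List Int), (PySem.Set.empty : PySem.Set Int))
  let right := pr.1.reverse
  -- forward pass over zip(topping, right[1:])
  let st := (topping.zip (PySem.List.slice right (some 1))).foldl
    (fun (q : Int × PySem.Set Int) tr =>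
      let l := PySem.Set.add q.2 tr.1
      (if (l.length : Int) == tr.2 then q.1 + 1 else q.1, l))
    ((0 : Int), (PySem.Set.empty : PySem.Set Int))
  st.1

-- ===== PRECONDITION & SPEC =====
def Spec_solution (topping : List Int) (out : Int) : Prop := out = solution_alt topping
instance (topping : List Int) (out : Int) : Decidable (Spec_solution topping out) := by unfold Spec_solution; infer_instance

-- ===== CLAIM (what is proved, stated in full; the proofs are below) =====
def Claim_equal_solution : Prop := ∀ (topping : List Int), Dom_solution topping → Spec_solution topping (solution topping)

-- ===== LEMMAS AND PROOFS =====

-- number of distinct values of l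
def dcount (l : List Int) : Nat := (PySem.Set.ofList l).length

-- common reference computation: walk the list keeping the set of values seen so far, count
-- positions where its size equals the distinct count of the remaining suffix
def F : List Int → PySem.Set Int → Int
  | [], _ => 0
  | x :: s, c =>
      let c' := PySem.Set.add c x
      (if c'.length = dcount s then 1 else 0) + F s c'

theorem dcount_ext {l l' : List Int} (h : ∀ v : Int, v ∈ l ↔ v ∈ l') : dcount l = dcount l' := by
  unfold dcount
  exact ((List.perm_ext_iff_of_nodup (PySem.Set.nodup_ofList l) (PySem.Set.nodup_ofList l')).2
    (fun a => by simp [PySem.Set.mem_ofList, h a])).length_eq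

theorem find?_filter_ne (t : List (Int × Int)) (k v : Int) (hvk : v ≠ k) :
    (t.filter (fun p => !(p.1 == k))).find? (fun p => p.1 == v)
      = t.find? (fun p => p.1 == v) := by
  induction t with
  | nil => rfl
  | cons p t ih =>
      by_cases hpk : p.1 = k
      · have hpv : ¬ (p.1 = v) := by omega
        rw [List.filter_cons, if_neg (by simp [hpk]), List.find?_cons_of_neg (by simp [hpv]), ih]
      · by_cases hpv : p.1 = v
        · rw [List.filter_cons, if_pos (by simp [hpk]), List.find?_cons_of_pos (by simp [hpv]),
            List.find?_cons_of_pos (by simp [hpv])]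
        · rw [List.filter_cons, if_pos (by simp [hpk]), List.find?_cons_of_neg (by simp [hpv]),
            List.find?_cons_of_neg (by simp [hpv]), ih]

theorem get?_erase (d : PySem.Dict Int Int) (k v : Int) :
    (d.erase k).get? v = if v = k then none else d.get? v := by
  by_cases hvk : v = k
  · subst hvk
    simp only [PySem.Dict.erase, PySem.Dict.get?]
    rw [List.find?_eq_none.2 ?_]
    · rfl
    · intro p hp
      have := (List.mem_filter.1 hp).2
      simpa using this
  · simp only [PySem.Dict.erase, PySem.Dict.get?, if_neg hvk]
    rw [find?_filter_ne d.items k v hvk]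

theorem nodup_keys_erase (d : PySem.Dict Int Int) (k : Int) (h : d.keys.Nodup) :
    (d.erase k).keys.Nodup := by
  have hs : (d.erase k).keys.Sublist d.keys := by
    simp only [PySem.Dict.keys, PySem.Dict.erase]
    exact List.filter_sublist.map _
  exact h.sublist hs

theorem size_eq_dcount (tp : PySem.Dict Int Int) (s : List Int) (hnd : tp.keys.Nodup)
    (hc : ∀ v : Int, tp.contains v = true ↔ v ∈ s) : tp.size = dcount s := by
  have hmem : ∀ v : Int, v ∈ tp.keys ↔ v ∈ PySem.Set.ofList s := by
    intro v
    rw [PySem.Set.mem_ofList, ← hc v, PySem.Dict.contains_iff_mem_keys]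
  have hperm := (List.perm_ext_iff_of_nodup hnd (PySem.Set.nodup_ofList s)).2 hmem
  have h2 : tp.size = tp.keys.length := by simp [PySem.Dict.size, PySem.Dict.keys]
  rw [h2, hperm.length_eq]; rfl

theorem A_loop (s : List Int) (ans : Int) (tp : PySem.Dict Int Int) (checked : PySem.Set Int)
    (hnd : tp.keys.Nodup)
    (hg : ∀ v : Int, tp.getD v 0 = (s.count v : Int))
    (hc : ∀ v : Int, tp.contains v = true ↔ v ∈ s) :
    (s.foldl
      (fun (st : Int × PySem.Dict Int Int × PySem.Set Int) i =>
        let tp := st.2.1.modify i 0 (· - 1)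
        let checked := PySem.Set.add st.2.2 i
        let tp := if tp.getD i 0 == 0 then tp.erase i else tp
        let answer := if checked.length == tp.size then st.1 + 1 else st.1
        (answer, tp, checked))
      (ans, tp, checked)).1 = ans + F s checked := by
  induction s generalizing ans tp checked with
  | nil => simp [F]
  | cons x s ih =>
      simp only [List.foldl_cons]
      set tp₁ := tp.modify x 0 (· - 1) with htp₁
      set checked' := PySem.Set.add checked x with hchk
      have hg₁ : ∀ v : Int, tp₁.getD v 0 = (s.count v : Int) := by
        intro v
        rw [htp₁, PySem.Dict.getD_modify]
        have hcc : List.count v (x :: s) = List.count v s + (if v = x then 1 else 0) := by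
          simp [List.count_cons]
          split_ifs with h1 h2 <;> omega
        by_cases hvx : v = x <;> simp [hvx, hg v, hg x, hcc]
      have hc₁ : ∀ v : Int, tp₁.contains v = true ↔ (v = x ∨ v ∈ s) := by
        intro v
        rw [htp₁, PySem.Dict.contains_modify]
        simp only [Bool.or_eq_true, beq_iff_eq, hc v, List.mem_cons]
        tauto
      have hnd₁ : tp₁.keys.Nodup := by
        rw [htp₁]
        have := PySem.Dict.nodup_keys_foldl_insert [x] (fun d a => d.getD a 0 - 1) tp hnd
        simpa [PySem.Dict.modify] using this
      set tp₂ := if tp₁.getD x 0 == 0 then tp₁.erase x else tp₁ with htp₂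
      have hg₂ : ∀ v : Int, tp₂.getD v 0 = (s.count v : Int) := by
        intro v
        rw [htp₂]
        split_ifs with h0
        · rw [PySem.Dict.getD_eq_get?_getD, get?_erase]
          by_cases hvx : v = x
          · subst hvx
            have : (s.count v : Int) = 0 := by
              have := hg₁ v; simp only [beq_iff_eq] at h0; omega
            simp [this]
          · rw [if_neg hvx]; exact (PySem.Dict.getD_eq_get?_getD _ _ _).symm.trans (hg₁ v)
        · exact hg₁ v
      have hc₂ : ∀ v : Int, tp₂.contains v = true ↔ v ∈ s := by
        intro v
        rw [htp₂]
        split_ifs with h0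
        · rw [PySem.Dict.contains_eq_isSome_get?, get?_erase]
          by_cases hvx : v = x
          · subst hvx
            have hcnt : s.count v = 0 := by have := hg₁ v; simp only [beq_iff_eq] at h0; omega
            simp [List.count_eq_zero.1 hcnt]
          · rw [if_neg hvx, ← PySem.Dict.contains_eq_isSome_get?, hc₁ v]
            simp [hvx]
        · rw [hc₁ v]
          have hx : x ∈ s := by
            have := hg₁ x
            simp only [beq_iff_eq] at h0
            have : 0 < s.count x := by omega
            exact List.count_pos_iff.1 this
          constructor
          · rintro (rfl | hv) <;> [exact hx; exact hv]
          · intro hv; right; exact hv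
      have hnd₂ : tp₂.keys.Nodup := by
        rw [htp₂]; split_ifs with h0
        · exact nodup_keys_erase _ _ hnd₁
        · exact hnd₁
      have hsize : tp₂.size = dcount s := size_eq_dcount _ _ hnd₂ hc₂
      have hcond : (checked'.length == tp₂.size) = decide (checked'.length = dcount s) := by
        rw [hsize]
        by_cases h : checked'.length = dcount s <;> simp [h]
      rw [ih _ _ _ hnd₂ hg₂ hc₂]
      simp only [F, hcond]
      split_ifs <;> simp_all <;> ring

theorem rev_loop (m : List Int) (acc : List Int) (seen : PySem.Set Int) :
    (m.foldl
      (fun (p : List Int × PySem.Set Int) t =>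
        let s := PySem.Set.add p.2 t
        (p.1 ++ [(s.length : Int)], s))
      (acc, seen)).1
    = acc ++ (List.range m.length).map
        (fun j => ((PySem.Set.update seen (m.take (j+1))).length : Int)) := by
  induction m generalizing acc seen with
  | nil => simp
  | cons x m ih =>
      rw [List.foldl_cons, ih]
      rw [List.append_assoc, List.singleton_append, List.length_cons,
        List.range_succ_eq_map, List.map_cons, List.map_map]
      rfl

theorem right_eq (topping : List Int) :
    ((topping.reverse.foldl
      (fun (p : List Int × PySem.Set Int) t =>
        let s := PySem.Set.add p.2 t
        (p.1 ++ [(s.length : Int)], s))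
      (([0] : List Int), (PySem.Set.empty : PySem.Set Int))).1).reverse
    = (List.range (topping.length + 1)).map (fun i => ((dcount (topping.drop i) : Int))) := by
  rw [rev_loop, List.reverse_append, List.length_reverse, List.range_succ, List.map_append]
  congr 1
  · conv_lhs => rw [← List.map_reverse, List.range_eq_range', List.reverse_range', List.map_map]
    apply List.map_congr_left
    intro j hj
    rw [List.mem_range] at hj
    show ((PySem.Set.update PySem.Set.empty (topping.reverse.take ((0 + topping.length - 1 - j) + 1))).length : Int)
       = ((dcount (topping.drop j) : Nat) : Int)
    have h1 : 0 + topping.length - 1 - j + 1 = topping.length - j := by omega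
    rw [h1, List.take_reverse]
    have h2 : topping.length - (topping.length - j) = j := by omega
    rw [h2]
    have h3 : (PySem.Set.update PySem.Set.empty ((topping.drop j).reverse)).length
        = dcount ((topping.drop j).reverse) := rfl
    rw [h3, dcount_ext (fun v => List.mem_reverse)]
  · show ([0] : List Int).reverse = [((dcount (topping.drop topping.length) : Nat) : Int)]
    rw [List.drop_length]
    rfl

theorem B_loop (s : List Int) (acc : Int) (checked : PySem.Set Int) :
    ((s.zip ((List.range s.length).map (fun i => (dcount (s.drop (i+1)) : Int)))).foldl
      (fun (q : Int × PySem.Set Int) tr =>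
        let l := PySem.Set.add q.2 tr.1
        (if (l.length : Int) == tr.2 then q.1 + 1 else q.1, l))
      (acc, checked)).1 = acc + F s checked := by
  induction s generalizing acc checked with
  | nil => simp [F]
  | cons x s ih =>
      simp only [List.length_cons, List.range_succ_eq_map, List.map_cons, List.map_map,
        List.zip_cons_cons, List.foldl_cons, List.drop_succ_cons, List.drop_zero]
      have hcomp : ((fun i => ((dcount (List.drop i s) : Int))) ∘ Nat.succ)
          = (fun i => ((dcount (List.drop (i+1) s) : Int))) := rfl
      rw [hcomp, ih]
      simp only [F]
      have hbe : (((PySem.Set.add checked x).length : Int) == (dcount s : Int))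
           = decide ((PySem.Set.add checked x).length = dcount s) := by
        by_cases h : (PySem.Set.add checked x).length = dcount s <;> simp [h]
      rw [hbe]
      split_ifs <;> simp_all <;> ring

theorem solution_eq_F (topping : List Int) : solution topping = F topping PySem.Set.empty := by
  show (topping.foldl _ (0, PySem.Dict.counter topping, PySem.Set.empty)).1 = _
  rw [A_loop topping 0 (PySem.Dict.counter topping) PySem.Set.empty
    (PySem.Dict.nodup_keys_counter topping)
    (fun v => PySem.Dict.getD_counter topping v)
    (fun v => by rw [PySem.Dict.contains_counter]; simp)]
  ring

theorem solution_alt_eq_F (topping : List Int) : solution_alt topping = F topping PySem.Set.empty := by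
  show ((topping.zip (PySem.List.slice _ (some 1))).foldl _ (0, PySem.Set.empty)).1 = _
  rw [right_eq, PySem.List.slice_from _ (by norm_num : (0:Int) ≤ 1)]
  have h1 : ((1:Int)).toNat = 1 := rfl
  rw [h1, List.range_succ_eq_map, List.map_cons, List.drop_succ_cons, List.drop_zero, List.map_map]
  have hcomp : ((fun i => ((dcount (topping.drop i) : Int))) ∘ Nat.succ)
      = (fun i => ((dcount (topping.drop (i+1)) : Int))) := rfl
  rw [hcomp, B_loop]
  ring

-- ===== VERDICT (by name: the statement is the Claim_ definition above) =====
theorem solution_spec : Claim_equal_solution := by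
  intro topping _
  unfold Spec_solution
  rw [solution_eq_F, solution_alt_eq_F]
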